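-- pv_equiv track=rewrite | github.com/vitorararuna/tag2_unb | tag.py | Remover_projetos_nao_preenchidos
-- ===== SOURCE A (Python) =====
-- def Remover_projetos_nao_preenchidos(projetos_match, projects):
--     projetos_out = dict()
--     projetos_out_list = []
--
--     projetos_out_list = [k for k in projetos_match.keys() if len(projetos_match[k]) < projects[k]["vagas"]]
--     projetos_out_list += [k for k in projects.keys() if k not in projetos_match.keys()]
--
--     for r in projetos_out_list:
--         if r in projetos_match.keys():
--             projetos_out[r] = projetos_match[r]
--             projetos_match.pop(r)
--         else:
--             projetos_out[r] = []
--
--     return projetos_match, projetos_out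
-- ===== SOURCE B (Python) =====
-- # B: single partition pass over projetos_match plus one pass over projects,
-- # instead of A's intermediate worklist + dispatch loop. Return-value equivalence
-- # only: A pops from projetos_match in place, B leaves its arguments untouched.
-- def Remover_projetos_nao_preenchidos(projetos_match, projects):
--     kept = {}
--     out = {}
--     for k, v in projetos_match.items():
--         if len(v) < projects[k]["vagas"]:
--             out[k] = v
--         else:
--             kept[k] = v
--     for k in projects:
--         if k not in projetos_match:
--             out[k] = []
--     return kept, out
-- ===== Notes on version B (the rewrite author's own statement) =====
-- stated objective: simpler
-- what changed: B replaces A's intermediate worklist (two comprehensions concatenated, then an if/else dispatch loop that pops from the input dict) with one direct partition pass over projetos_match and one pass over projects adding the missing keys, building kept/out dicts without mutating the input.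
import Mathlib
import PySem

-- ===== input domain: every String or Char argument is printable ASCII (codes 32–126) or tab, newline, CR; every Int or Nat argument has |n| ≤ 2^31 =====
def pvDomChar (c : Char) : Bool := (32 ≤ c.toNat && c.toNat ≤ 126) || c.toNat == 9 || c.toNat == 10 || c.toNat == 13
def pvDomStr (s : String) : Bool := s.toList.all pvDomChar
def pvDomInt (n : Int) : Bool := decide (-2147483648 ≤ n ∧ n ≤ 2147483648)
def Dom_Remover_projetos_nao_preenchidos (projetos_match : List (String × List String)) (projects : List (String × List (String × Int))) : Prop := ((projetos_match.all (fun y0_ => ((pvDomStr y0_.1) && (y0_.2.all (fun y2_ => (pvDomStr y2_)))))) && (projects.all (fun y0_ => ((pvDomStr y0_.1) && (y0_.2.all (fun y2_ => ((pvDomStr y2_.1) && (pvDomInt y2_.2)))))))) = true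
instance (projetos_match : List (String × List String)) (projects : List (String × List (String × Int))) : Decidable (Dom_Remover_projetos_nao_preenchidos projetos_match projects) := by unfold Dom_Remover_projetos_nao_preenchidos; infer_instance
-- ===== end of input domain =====

-- B builds kept/out by one partition pass plus one missing-keys pass instead of A's
-- worklist + dispatch loop; return-value equivalence only (Python A pops from projetos_match
-- in place, B does not mutate its arguments).

-- ===== PORT A =====
-- projects[k]["vagas"] raises KeyError when k is absent or "vagas" is missing; those inputs
-- are excluded by Pre_, so the total '(… ).getD' form below is exact on the admitted domain.
def pvVagasA (projects : List (String × List (String × Int))) (k : String) : Int :=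
  (((List.lookup k projects).getD []).lookup "vagas").getD 0

def pvStepA (st : (List (String × List String)) × (List (String × List String))) (r : String) :
    (List (String × List String)) × (List (String × List String)) :=
  if (st.1.map (·.1)).contains r then
    (st.1.eraseP (fun p => p.1 == r), st.2 ++ [(r, (List.lookup r st.1).getD [])])
  else
    (st.1, st.2 ++ [(r, [])])

def Remover_projetos_nao_preenchidos (projetos_match : List (String × List String)) (projects : List (String × List (String × Int))) : (List (String × List String)) × (List (String × List String)) :=
  let projetos_out_list :=
    ((projetos_match.map (·.1)).filter (fun k =>
        decide (((((List.lookup k projetos_match).getD []).length : Int)) < pvVagasA projects k)))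
    ++ ((projects.map (·.1)).filter (fun k => !(projetos_match.map (·.1)).contains k))
  let st := projetos_out_list.foldl pvStepA (projetos_match, [])
  (st.1, st.2)

-- ===== PORT B =====
-- (Source B's 'projects[k][\"vagas\"]' is the same dict access as A's; it reuses pvVagasA)
def Remover_projetos_nao_preenchidos_alt (projetos_match : List (String × List String)) (projects : List (String × List (String × Int))) : (List (String × List String)) × (List (String × List String)) :=
  let st := projetos_match.foldl
    (fun (st : (List (String × List String)) × (List (String × List String))) kv =>
      if ((kv.2.length : Int)) < pvVagasA projects kv.1 then
        (st.1, st.2 ++ [kv])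
      else
        (st.1 ++ [kv], st.2)) ([], [])
  let out := st.2 ++ projects.filterMap (fun p =>
      if (projetos_match.map (·.1)).contains p.1 then none else some (p.1, ([] : List String)))
  (st.1, out)

-- ===== PRECONDITION & SPEC =====
-- Pre_ excludes (a) inputs where A raises KeyError — a projetos_match key absent from projects
-- or whose project dict lacks "vagas" — and (b) association lists with duplicate keys, which do
-- not represent Python dicts (every Python dict input has unique keys).
def Pre_Remover_projetos_nao_preenchidos (projetos_match : List (String × List String)) (projects : List (String × List (String × Int))) : Prop :=
  (projetos_match.map (·.1)).Nodup ∧ (projects.map (·.1)).Nodup ∧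
  (∀ p ∈ projects, (p.2.map (·.1)).Nodup) ∧
  (∀ q ∈ projetos_match, ∃ p ∈ projects, p.1 = q.1 ∧ "vagas" ∈ p.2.map (·.1))
instance (projetos_match : List (String × List String)) (projects : List (String × List (String × Int))) : Decidable (Pre_Remover_projetos_nao_preenchidos projetos_match projects) := by unfold Pre_Remover_projetos_nao_preenchidos; infer_instance

def pvWitness_Remover_projetos_nao_preenchidos : (List (String × List String)) × (List (String × List (String × Int))) :=
  ([("a", ["x"])], [("a", [("vagas", 2)]), ("b", [("vagas", 1)])])

def Spec_Remover_projetos_nao_preenchidos (projetos_match : List (String × List String)) (projects : List (String × List (String × Int))) (out : (List (String × List String)) × (List (String × List String))) : Prop := out = Remover_projetos_nao_preenchidos_alt projetos_match projects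
instance (projetos_match : List (String × List String)) (projects : List (String × List (String × Int))) (out : (List (String × List String)) × (List (String × List String))) : Decidable (Spec_Remover_projetos_nao_preenchidos projetos_match projects out) := by unfold Spec_Remover_projetos_nao_preenchidos; infer_instance

-- ===== CLAIM (what is proved, stated in full; the proofs are below) =====
def Claim_equal_Remover_projetos_nao_preenchidos : Prop := ∀ (projetos_match : List (String × List String)) (projects : List (String × List (String × Int))), Dom_Remover_projetos_nao_preenchidos projetos_match projects → Pre_Remover_projetos_nao_preenchidos projetos_match projects → Spec_Remover_projetos_nao_preenchidos projetos_match projects (Remover_projetos_nao_preenchidos projetos_match projects)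

-- ===== LEMMAS AND PROOFS =====

-- first-match lookup finds a pair's own value when keys are unique
theorem pv_lookup_self_of_nodup {β : Type} (pm : List (String × β)) (k : String) (v : β)
    (hnd : (pm.map (·.1)).Nodup) (hmem : (k, v) ∈ pm) : List.lookup k pm = some v := by
  induction pm with
  | nil => cases hmem
  | cons kv rest ih =>
    obtain ⟨k1, v1⟩ := kv
    simp only [List.map_cons, List.nodup_cons] at hnd
    rcases List.mem_cons.mp hmem with h | h
    · rw [Prod.mk.injEq] at h
      simp [List.lookup, h.1.symm, h.2]
    · have hne : (k == k1) = false := by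
        apply beq_false_of_ne
        intro he
        have : k ∈ rest.map (·.1) := List.mem_map_of_mem h
        exact hnd.1 (he ▸ this)
      simp only [List.lookup, hne]
      exact ih hnd.2 h

-- A's dispatch loop over keys it will not find: it only appends (r, [])
theorem pv_phase2 (rs : List String) (st1 out : List (String × List String))
    (h : ∀ r ∈ rs, ¬ r ∈ st1.map (·.1)) :
    rs.foldl pvStepA (st1, out) = (st1, out ++ rs.map (fun r => (r, []))) := by
  induction rs generalizing out with
  | nil => simp
  | cons r rs ih =>
    have hc : ((st1.map (·.1)).contains r) = false := by
      simpa using h r (List.mem_cons_self ..)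
    have hstep : pvStepA (st1, out) r = (st1, out ++ [(r, [])]) := by
      simp only [pvStepA, hc, Bool.false_eq_true, if_false]
    rw [List.foldl_cons, hstep, ih (out ++ [(r, [])]) (fun x hx => h x (List.mem_cons_of_mem _ hx))]
    simp

-- A's dispatch loop ignores a head entry whose key it never visits
theorem pv_skip_cons : ∀ (rs : List String) (kv : String × List String)
    (pm' out : List (String × List String)), kv.1 ∉ rs →
    rs.foldl pvStepA (kv :: pm', out) =
      (kv :: (rs.foldl pvStepA (pm', out)).1, (rs.foldl pvStepA (pm', out)).2)
  | [], kv, pm', out, _ => by simp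
  | r :: rs, kv, pm', out, h => by
    have hne : kv.1 ≠ r := fun he => h (he ▸ List.mem_cons_self ..)
    have htl : kv.1 ∉ rs := fun hm => h (List.mem_cons_of_mem _ hm)
    have hb1 : (kv.1 == r) = false := by simpa using hne
    have hb2 : (r == kv.1) = false := by simpa using Ne.symm hne
    have hstep : pvStepA (kv :: pm', out) r =
        (kv :: (pvStepA (pm', out) r).1, (pvStepA (pm', out) r).2) := by
      obtain ⟨k1, v1⟩ := kv
      simp only [] at hb1 hb2
      simp only [pvStepA, List.map_cons, List.contains_cons, hb1, Bool.false_or,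
        List.lookup, hb2, List.eraseP_cons]
      split <;> rfl
    rw [List.foldl_cons, List.foldl_cons, hstep]
    have := pv_skip_cons rs kv (pvStepA (pm', out) r).1 (pvStepA (pm', out) r).2 htl
    simpa using this

-- A's dispatch loop over the underfilled keys of pm moves exactly those entries
theorem pv_phase1 (P : String → Bool) (pm : List (String × List String))
    (out : List (String × List String)) (hnd : (pm.map (·.1)).Nodup) :
    ((pm.map (·.1)).filter P).foldl pvStepA (pm, out) =
      (pm.filter (fun kv => !P kv.1), out ++ pm.filter (fun kv => P kv.1)) := by
  induction pm generalizing out with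
  | nil => simp
  | cons kv rest ih =>
    simp only [List.map_cons, List.nodup_cons] at hnd
    by_cases hP : P kv.1 = true
    · have hstep : pvStepA (kv :: rest, out) kv.1 = (rest, out ++ [(kv.1, kv.2)]) := by
        obtain ⟨k1, v1⟩ := kv
        simp [pvStepA, List.lookup]
      simp only [List.map_cons, List.filter_cons, hP, reduceIte, List.foldl_cons]
      rw [hstep, ih _ hnd.2]
      simp
    · have hPf : P kv.1 = false := by simpa using hP
      have hnot : kv.1 ∉ (rest.map (·.1)).filter P :=
        fun hm => hnd.1 (List.mem_of_mem_filter hm)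
      simp only [List.map_cons, List.filter_cons, hPf, Bool.false_eq_true, reduceIte]
      rw [pv_skip_cons _ _ _ _ hnot, ih _ hnd.2]
      simp

-- B's missing-keys pass, written as a filterMap, is the map of the filtered key list
theorem pv_filterMap_missing (pj : List (String × List (String × Int))) (c : String → Bool) :
    pj.filterMap (fun p => if c p.1 then none else some (p.1, ([] : List String))) =
      ((pj.map (·.1)).filter (fun k => !c k)).map (fun r => (r, [])) := by
  induction pj with
  | nil => rfl
  | cons p rest ih =>
    by_cases hc : c p.1 = true <;> simp [hc, ih]

-- B's partition pass is the pair of filters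
theorem pv_partition (Q : (String × List String) → Prop) [DecidablePred Q]
    (pm a b : List (String × List String)) :
    pm.foldl (fun st kv => if Q kv then (st.1, st.2 ++ [kv]) else (st.1 ++ [kv], st.2)) (a, b) =
      (a ++ pm.filter (fun kv => !decide (Q kv)), b ++ pm.filter (fun kv => decide (Q kv))) := by
  induction pm generalizing a b with
  | nil => simp
  | cons kv rest ih =>
    by_cases hQ : Q kv
    · simp [hQ, ih]
    · simp [hQ, ih]

-- ===== VERDICT (by name: the statement is the Claim_ definition above) =====
theorem Remover_projetos_nao_preenchidos_spec : Claim_equal_Remover_projetos_nao_preenchidos := by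
  intro pm pj _hDom hPre
  obtain ⟨hnd, -, -, -⟩ := hPre
  unfold Spec_Remover_projetos_nao_preenchidos
  unfold Remover_projetos_nao_preenchidos Remover_projetos_nao_preenchidos_alt
  simp only [List.foldl_append]
  rw [pv_phase1 _ _ _ hnd]
  rw [pv_phase2 _ _ _ (by
    intro r hr hmem
    simp only [List.mem_filter, List.mem_map, Bool.not_eq_true'] at hr hmem
    obtain ⟨kv, hkv, rfl⟩ := hmem
    have hkv' := hkv.1
    rcases hr with ⟨-, hr2⟩
    rw [List.contains_eq_mem] at hr2
    simp only [decide_eq_false_iff_not, List.mem_map] at hr2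
    exact hr2 ⟨kv, hkv', rfl⟩)]
  rw [pv_partition, pv_filterMap_missing]
  have htest : ∀ kv ∈ pm,
      decide ((((List.lookup kv.1 pm).getD []).length : Int) < pvVagasA pj kv.1)
        = decide (((kv.2.length : Int)) < pvVagasA pj kv.1) := by
    intro kv hm
    rw [pv_lookup_self_of_nodup pm kv.1 kv.2 hnd hm]
    rfl
  have h1 : pm.filter (fun kv => !decide ((((List.lookup kv.1 pm).getD []).length : Int) < pvVagasA pj kv.1))
      = pm.filter (fun kv => !decide (((kv.2.length : Int)) < pvVagasA pj kv.1)) :=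
    List.filter_congr (fun kv hm => by rw [htest kv hm])
  have h2 : pm.filter (fun kv => decide ((((List.lookup kv.1 pm).getD []).length : Int) < pvVagasA pj kv.1))
      = pm.filter (fun kv => decide (((kv.2.length : Int)) < pvVagasA pj kv.1)) :=
    List.filter_congr (fun kv hm => by rw [htest kv hm])
  refine Prod.ext ?_ ?_ <;> simp [h1, h2]
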